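-- pv_equiv track=rewrite | github.com/lucianoshelby/automx | automacoes/cos/auto_cos.py | definir_defeito
-- ===== SOURCE A (Python) =====
-- def definir_defeito(descricao):
--     descricao_lower = descricao.lower()
--
--     if "repair kit" in descricao_lower or "tape" in descricao_lower:
--         return None  # Ignorar essa peça
--     if "vinyl" in descricao_lower or "protector" in descricao_lower:
--         return "Troca obrigatória"  # Ignorar peças com esses termos
--     if "pba main" in descricao_lower or "pba-main" in descricao_lower:
--         return "NÃO LIGA"
--     if any(term in descricao_lower for term in ["octa assy", "front-bt", "front-lte", "sub ub", "mea front-sm-r", "lcd", "sub oled", "smt-octa", "assy-oled", "main display", "main ub", "assy oled"]):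
--         return "SEM IMAGEM"
--     if "batt" in descricao_lower or "battery" in descricao_lower:
--         return "TROCA OBRIGATÓRIA"
--     if ("if pba" in descricao_lower or "sub pba" in descricao_lower) and not any(term in descricao_lower for term in ["fpcb", "camera", "volume", "frc", "ctc"]):
--         return "NÃO CARREGA"
--     if any(term in descricao_lower for term in ["fpcb", "frc", "ctc", "con to con", "con-to-con"]):
--         return "MAL CONTATO"
--     if "camera" in descricao_lower:
--         return "NÃO FOCA"
--     if any(term in descricao_lower for term in ["case-front", "case-rear", "metal front", "front module", "aro"]):
--         return "FALHA DE REDE (ANTENA)"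
--     if any(term in descricao_lower for term in ["cover-back", "back cover", "back glass", "svc cover"]):
--         return "DESCASCOU NA ABERTURA"
--     return "Defeito desconhecido"
-- ===== SOURCE B (Python) =====
-- # Collect-then-resolve: one comprehension gathers ALL matching rule indices,
-- # priority is resolved arithmetically with min(); the single exclusion rule is
-- # a post-filter. No ordered early-exit if-chain / first-match scan.
--
-- _TABLE = [
--     (["repair kit", "tape"], None),
--     (["vinyl", "protector"], "Troca obrigatória"),
--     (["pba main", "pba-main"], "NÃO LIGA"),
--     (["octa assy", "front-bt", "front-lte", "sub ub", "mea front-sm-r", "lcd",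
--       "sub oled", "smt-octa", "assy-oled", "main display", "main ub", "assy oled"],
--      "SEM IMAGEM"),
--     (["batt", "battery"], "TROCA OBRIGATÓRIA"),
--     (["if pba", "sub pba"], "NÃO CARREGA"),
--     (["fpcb", "frc", "ctc", "con to con", "con-to-con"], "MAL CONTATO"),
--     (["camera"], "NÃO FOCA"),
--     (["case-front", "case-rear", "metal front", "front module", "aro"],
--      "FALHA DE REDE (ANTENA)"),
--     (["cover-back", "back cover", "back glass", "svc cover"],
--      "DESCASCOU NA ABERTURA"),
-- ]
-- _NAO_CARREGA = 5
-- _BLOCKERS = ["fpcb", "camera", "volume", "frc", "ctc"]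
--
--
-- def definir_defeito(descricao):
--     d = descricao.lower()
--     hits = [i for i, (terms, _) in enumerate(_TABLE) if any(t in d for t in terms)]
--     if _NAO_CARREGA in hits and any(t in d for t in _BLOCKERS):
--         hits = [i for i in hits if i != _NAO_CARREGA]
--     if not hits:
--         return "Defeito desconhecido"
--     return _TABLE[min(hits)][1]
-- ===== Notes on version B (the rewrite author's own statement) =====
-- stated objective: alternative
-- what changed: Replaces A's ordered early-exit if-chain by a collect-then-resolve pass: one comprehension gathers the indices of ALL matching rules, the single exclusion rule is applied as a post-filter, and priority is resolved arithmetically with min() over the collected indices.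
import Mathlib
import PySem

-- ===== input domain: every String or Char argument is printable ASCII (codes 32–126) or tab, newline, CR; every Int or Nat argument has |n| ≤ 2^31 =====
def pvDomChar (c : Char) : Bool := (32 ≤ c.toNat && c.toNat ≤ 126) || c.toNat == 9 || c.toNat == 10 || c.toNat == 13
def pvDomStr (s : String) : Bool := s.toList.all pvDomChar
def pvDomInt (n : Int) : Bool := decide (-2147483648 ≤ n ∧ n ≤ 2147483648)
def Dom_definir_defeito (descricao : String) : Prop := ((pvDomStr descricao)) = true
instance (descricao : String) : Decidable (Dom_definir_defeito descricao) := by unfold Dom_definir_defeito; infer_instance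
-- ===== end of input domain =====

-- B replaces A's ordered early-exit if-chain by a collect-then-resolve pass:
-- gather ALL matching rule indices, post-filter the one excluded rule, and
-- resolve priority with min (objective: alternative; equal return values).

-- ===== PORT A =====
-- literal transliteration of A's if-chain; 'x in s' = PySem.Str.isIn
def definir_defeito (descricao : String) : Option String :=
  let dl := PySem.Str.lower descricao
  if PySem.Str.isIn "repair kit" dl || PySem.Str.isIn "tape" dl then
    none
  else if PySem.Str.isIn "vinyl" dl || PySem.Str.isIn "protector" dl then
    some "Troca obrigatória"
  else if PySem.Str.isIn "pba main" dl || PySem.Str.isIn "pba-main" dl then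
    some "NÃO LIGA"
  else if (["octa assy", "front-bt", "front-lte", "sub ub", "mea front-sm-r", "lcd",
            "sub oled", "smt-octa", "assy-oled", "main display", "main ub", "assy oled"]).any
           (fun term => PySem.Str.isIn term dl) then
    some "SEM IMAGEM"
  else if PySem.Str.isIn "batt" dl || PySem.Str.isIn "battery" dl then
    some "TROCA OBRIGATÓRIA"
  else if (PySem.Str.isIn "if pba" dl || PySem.Str.isIn "sub pba" dl) &&
          !((["fpcb", "camera", "volume", "frc", "ctc"]).any (fun term => PySem.Str.isIn term dl)) then
    some "NÃO CARREGA"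
  else if (["fpcb", "frc", "ctc", "con to con", "con-to-con"]).any (fun term => PySem.Str.isIn term dl) then
    some "MAL CONTATO"
  else if PySem.Str.isIn "camera" dl then
    some "NÃO FOCA"
  else if (["case-front", "case-rear", "metal front", "front module", "aro"]).any
           (fun term => PySem.Str.isIn term dl) then
    some "FALHA DE REDE (ANTENA)"
  else if (["cover-back", "back cover", "back glass", "svc cover"]).any
           (fun term => PySem.Str.isIn term dl) then
    some "DESCASCOU NA ABERTURA"
  else
    some "Defeito desconhecido"

-- ===== PORT B =====
-- Source B's _TABLE: (positive terms, result) in priority order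
def ddTable : List (List String × Option String) :=
  [ (["repair kit", "tape"], none),
    (["vinyl", "protector"], some "Troca obrigatória"),
    (["pba main", "pba-main"], some "NÃO LIGA"),
    (["octa assy", "front-bt", "front-lte", "sub ub", "mea front-sm-r", "lcd",
      "sub oled", "smt-octa", "assy-oled", "main display", "main ub", "assy oled"],
     some "SEM IMAGEM"),
    (["batt", "battery"], some "TROCA OBRIGATÓRIA"),
    (["if pba", "sub pba"], some "NÃO CARREGA"),
    (["fpcb", "frc", "ctc", "con to con", "con-to-con"], some "MAL CONTATO"),
    (["camera"], some "NÃO FOCA"),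
    (["case-front", "case-rear", "metal front", "front module", "aro"],
     some "FALHA DE REDE (ANTENA)"),
    (["cover-back", "back cover", "back glass", "svc cover"],
     some "DESCASCOU NA ABERTURA") ]

def ddNaoCarrega : Int := 5
def ddBlockers : List String := ["fpcb", "camera", "volume", "frc", "ctc"]

-- transliteration of Source B: collect all matching indices, post-filter rule 5,
-- 'if not hits' = emptiness, _TABLE[min(hits)][1] via min? / pyGet?
-- (the pyGet? 'none' branch is Python's IndexError, unreachable: min? ∈ hits ⊆ 0..9)
def definir_defeito_alt (descricao : String) : Option String :=
  let d := PySem.Str.lower descricao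
  let hits := (PySem.List.enumerate ddTable).filterMap
    (fun p => if p.2.1.any (fun t => PySem.Str.isIn t d) then some p.1 else none)
  let hits := if hits.contains ddNaoCarrega && ddBlockers.any (fun t => PySem.Str.isIn t d) then
      hits.filter (fun i => i ≠ ddNaoCarrega)
    else hits
  match PySem.List.min? hits (fun i => i) with
  | none => some "Defeito desconhecido"
  | some m =>
      match PySem.List.pyGet? ddTable m with
      | some r => r.2
      | none => none

-- ===== PRECONDITION & SPEC =====
def Spec_definir_defeito (descricao : String) (out : Option String) : Prop := out = definir_defeito_alt descricao
instance (descricao : String) (out : Option String) : Decidable (Spec_definir_defeito descricao out) := by unfold Spec_definir_defeito; infer_instance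

-- ===== CLAIM (what is proved, stated in full; the proofs are below) =====
def Claim_equal_definir_defeito : Prop := ∀ (descricao : String), Dom_definir_defeito descricao → Spec_definir_defeito descricao (definir_defeito descricao)

-- ===== LEMMAS AND PROOFS =====

-- ===== VERDICT (by name: the statement is the Claim_ definition above) =====
set_option maxHeartbeats 2000000 in
theorem definir_defeito_spec : Claim_equal_definir_defeito := by
  intro descricao _
  unfold Spec_definir_defeito definir_defeito definir_defeito_alt
  simp only [ddTable, ddBlockers, ddNaoCarrega,
    PySem.List.enumerate_cons, PySem.List.enumerate_nil,
    List.filterMap_cons, List.filterMap_nil,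
    List.any_cons, List.any_nil, Bool.or_false]
  generalize (PySem.Str.isIn "fpcb" (PySem.Str.lower descricao) || (PySem.Str.isIn "camera" (PySem.Str.lower descricao) || (PySem.Str.isIn "volume" (PySem.Str.lower descricao) || (PySem.Str.isIn "frc" (PySem.Str.lower descricao) || PySem.Str.isIn "ctc" (PySem.Str.lower descricao))))) = b
  generalize (PySem.Str.isIn "repair kit" (PySem.Str.lower descricao) || PySem.Str.isIn "tape" (PySem.Str.lower descricao)) = m0
  generalize (PySem.Str.isIn "vinyl" (PySem.Str.lower descricao) || PySem.Str.isIn "protector" (PySem.Str.lower descricao)) = m1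
  generalize (PySem.Str.isIn "pba main" (PySem.Str.lower descricao) || PySem.Str.isIn "pba-main" (PySem.Str.lower descricao)) = m2
  generalize (PySem.Str.isIn "octa assy" (PySem.Str.lower descricao) || (PySem.Str.isIn "front-bt" (PySem.Str.lower descricao) || (PySem.Str.isIn "front-lte" (PySem.Str.lower descricao) || (PySem.Str.isIn "sub ub" (PySem.Str.lower descricao) || (PySem.Str.isIn "mea front-sm-r" (PySem.Str.lower descricao) || (PySem.Str.isIn "lcd" (PySem.Str.lower descricao) || (PySem.Str.isIn "sub oled" (PySem.Str.lower descricao) || (PySem.Str.isIn "smt-octa" (PySem.Str.lower descricao) || (PySem.Str.isIn "assy-oled" (PySem.Str.lower descricao) || (PySem.Str.isIn "main display" (PySem.Str.lower descricao) || (PySem.Str.isIn "main ub" (PySem.Str.lower descricao) || PySem.Str.isIn "assy oled" (PySem.Str.lower descricao)))))))))))) = m3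
  generalize (PySem.Str.isIn "batt" (PySem.Str.lower descricao) || PySem.Str.isIn "battery" (PySem.Str.lower descricao)) = m4
  generalize (PySem.Str.isIn "if pba" (PySem.Str.lower descricao) || PySem.Str.isIn "sub pba" (PySem.Str.lower descricao)) = m5
  generalize (PySem.Str.isIn "fpcb" (PySem.Str.lower descricao) || (PySem.Str.isIn "frc" (PySem.Str.lower descricao) || (PySem.Str.isIn "ctc" (PySem.Str.lower descricao) || (PySem.Str.isIn "con to con" (PySem.Str.lower descricao) || PySem.Str.isIn "con-to-con" (PySem.Str.lower descricao))))) = m6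
  generalize (PySem.Str.isIn "camera" (PySem.Str.lower descricao)) = m7
  generalize (PySem.Str.isIn "case-front" (PySem.Str.lower descricao) || (PySem.Str.isIn "case-rear" (PySem.Str.lower descricao) || (PySem.Str.isIn "metal front" (PySem.Str.lower descricao) || (PySem.Str.isIn "front module" (PySem.Str.lower descricao) || PySem.Str.isIn "aro" (PySem.Str.lower descricao))))) = m8
  generalize (PySem.Str.isIn "cover-back" (PySem.Str.lower descricao) || (PySem.Str.isIn "back cover" (PySem.Str.lower descricao) || (PySem.Str.isIn "back glass" (PySem.Str.lower descricao) || PySem.Str.isIn "svc cover" (PySem.Str.lower descricao)))) = m9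
  revert b m0 m1 m2 m3 m4 m5 m6 m7 m8 m9
  decide
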